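-- pv_equiv track=rewrite | github.com/heeavens/atu_timetable | services/scraper_service.py | _extract_building
-- ===== SOURCE A (Python) =====
-- def _extract_building(room: str | None) -> str | None:
--     if not room or room == "TBA":
--         return None
--     building_map = {
--         "B1": "Building 1",
--         "B2": "Building 2",
--         "B3": "Building 3",
--     }
--     for prefix, name in building_map.items():
--         if room.upper().startswith(prefix):
--             return name
--     return None
-- ===== SOURCE B (Python) =====
-- def _extract_building(room: str | None) -> str | None:
--     if not room or room == "TBA":
--         return None
--     if len(room) >= 2 and room[0] in "Bb" and room[1] in "123":
--         return "Building " + room[1]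
--     return None
-- ===== Notes on version B (the rewrite author's own statement) =====
-- stated objective: alternative
-- what changed: B drops the building_map table and the scan over its items entirely: it checks the two leading characters directly (letter B in either case followed by a digit between 1 and 3) and synthesizes the result by concatenating the word Building with that digit, correct because each table entry maps such a prefix to exactly that name.
import Mathlib
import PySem

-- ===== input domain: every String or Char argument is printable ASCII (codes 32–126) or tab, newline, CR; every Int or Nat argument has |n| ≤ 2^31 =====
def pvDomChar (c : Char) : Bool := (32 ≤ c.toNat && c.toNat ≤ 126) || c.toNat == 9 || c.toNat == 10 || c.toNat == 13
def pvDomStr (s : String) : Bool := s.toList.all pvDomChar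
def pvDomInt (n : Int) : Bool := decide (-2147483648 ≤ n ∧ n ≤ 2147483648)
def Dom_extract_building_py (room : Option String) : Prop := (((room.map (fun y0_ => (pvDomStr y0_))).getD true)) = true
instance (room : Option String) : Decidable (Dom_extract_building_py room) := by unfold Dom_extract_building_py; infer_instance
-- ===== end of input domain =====

-- B eliminates A's table and its item scan: it tests the two leading characters directly
-- ('B'/'b' then a digit 1-3) and builds the name as "Building " + that digit; objective: alternative.

-- ===== PORT A =====
-- the dict literal 'building_map' of _extract_building, in insertion order
def pvBuildingMap : PySem.Dict String String :=
  ((PySem.Dict.empty.insert "B1" "Building 1").insert "B2" "Building 2").insert "B3" "Building 3"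

-- 'for prefix, name in building_map.items(): if room.upper().startswith(prefix): return name'
def pvScanLoop (r : String) : List (String × String) → Option String
  | [] => none
  | (pfx, name) :: rest =>
      if PySem.Str.startswith (PySem.Str.upper r) pfx then some name else pvScanLoop r rest

def extract_building_py (room : Option String) : Option String :=
  match room with
  | none => none
  | some r =>
      if r = "" ∨ r = "TBA" then none
      else pvScanLoop r pvBuildingMap.items

-- ===== PORT B =====
-- 'if len(room) >= 2 and room[0] in "Bb" and room[1] in "123": return "Building " + room[1]'
-- (the len >= 2 check and the two indexings are the match on the first two characters)
def extract_building_py_alt (room : Option String) : Option String :=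
  match room with
  | none => none
  | some r =>
      if r = "" ∨ r = "TBA" then none
      else
        match r.toList with
        | a :: b :: _ =>
            if (a = 'B' ∨ a = 'b') ∧ (b = '1' ∨ b = '2' ∨ b = '3') then
              some (String.ofList ("Building ".toList ++ [b]))
            else none
        | _ => none

-- ===== PRECONDITION & SPEC =====
def Spec_extract_building_py (room : Option String) (out : Option String) : Prop := out = extract_building_py_alt room
instance (room : Option String) (out : Option String) : Decidable (Spec_extract_building_py room out) := by unfold Spec_extract_building_py; infer_instance

-- ===== CLAIM (what is proved, stated in full; the proofs are below) =====
def Claim_equal_extract_building_py : Prop := ∀ (room : Option String), Dom_extract_building_py room → Spec_extract_building_py room (extract_building_py room)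

-- ===== LEMMAS AND PROOFS =====

theorem charOfNat_val_toNat (n : Nat) (h : n < 55296) : (Char.ofNat n).val.toNat = n := by
  simp [Char.ofNat, Char.ofNatAux, Nat.isValidChar, h]

-- Python's str.upper per character: equal to d (a non-lowercase target) iff the source is d
-- itself or its lowercase counterpart when d is an uppercase letter
theorem upperChar_eq_iff (c d : Char) (hd : d.val.toNat < 97 ∨ 122 < d.val.toNat) :
    (PySem.Chars.upperChar c = d) ↔
      (c = d ∨ (c.val.toNat = d.val.toNat + 32 ∧ 65 ≤ d.val.toNat ∧ d.val.toNat ≤ 90)) := by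
  simp only [PySem.Chars.upperChar, PySem.Chars.islower, Bool.and_eq_true, decide_eq_true_eq,
    Char.toNat]
  split_ifs with h
  · have h1' : 97 ≤ c.val.toNat := UInt32.le_iff_toNat_le.mp (Char.le_def.mp h.1)
    have h2' : c.val.toNat ≤ 122 := UInt32.le_iff_toNat_le.mp (Char.le_def.mp h.2)
    constructor
    · intro he
      have hv : (Char.ofNat (c.val.toNat - 32)).val.toNat = d.val.toNat := by rw [he]
      rw [charOfNat_val_toNat _ (by omega)] at hv
      right; exact ⟨by omega, by omega, by omega⟩
    · rintro (rfl | ⟨ha, hb, hc2⟩)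
      · omega
      · apply Char.ext; apply UInt32.toNat_inj.mp
        rw [charOfNat_val_toNat _ (by omega)]
        omega
  · rw [not_and_or] at h
    have h' : c.val.toNat < 97 ∨ 122 < c.val.toNat := by
      have ea : 'a'.val.toNat = 97 := by decide
      have ez : 'z'.val.toNat = 122 := by decide
      rcases h with h | h
      · left
        have := UInt32.lt_iff_toNat_lt.mp (Char.lt_def.mp (Char.not_le.mp h))
        omega
      · right
        have := UInt32.lt_iff_toNat_lt.mp (Char.lt_def.mp (Char.not_le.mp h))
        omega
    constructor
    · intro he; left; exact he
    · rintro (rfl | ⟨ha, hb, hc2⟩)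
      · rfl
      · omega

theorem toNat_back (c d : Char) (h : c.val.toNat = d.val.toNat) : c = d :=
  Char.ext (UInt32.toNat_inj.mp h)

theorem upperChar_eq_B (c : Char) : ('B' = PySem.Chars.upperChar c) ↔ (c = 'B' ∨ c = 'b') := by
  rw [eq_comm, upperChar_eq_iff c 'B' (by left; decide)]
  constructor
  · rintro (h | ⟨h, -, -⟩)
    · exact Or.inl h
    · exact Or.inr (toNat_back _ _ h)
  · rintro (rfl | rfl)
    · exact Or.inl rfl
    · exact Or.inr ⟨rfl, by decide, by decide⟩

theorem upperChar_eq_digit (c d : Char) (hd : d = '1' ∨ d = '2' ∨ d = '3') :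
    (d = PySem.Chars.upperChar c) ↔ (c = d) := by
  rw [eq_comm, upperChar_eq_iff c d (by rcases hd with rfl | rfl | rfl <;> [left; left; left] <;> decide)]
  constructor
  · rintro (h | ⟨-, hb, -⟩)
    · exact h
    · exfalso; rcases hd with rfl | rfl | rfl <;> simp_all
  · intro h; exact Or.inl h

-- core: the three startswith tests of the scan equal B's direct two-character test
theorem pvScan_eq_alt (r : String) :
    pvScanLoop r pvBuildingMap.items
      = (match r.toList with
         | a :: b :: _ =>
             if (a = 'B' ∨ a = 'b') ∧ (b = '1' ∨ b = '2' ∨ b = '3') then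
               some (String.ofList ("Building ".toList ++ [b]))
             else none
         | _ => none) := by
  have hitems : pvBuildingMap.items
      = [("B1", "Building 1"), ("B2", "Building 2"), ("B3", "Building 3")] := by decide
  rw [hitems]
  simp only [pvScanLoop, PySem.Str.startswith_eq, PySem.Str.toList_upper]
  match hl : r.toList with
  | [] => simp [PySem.Chars.upper, PySem.Chars.startswith]
  | [a] => simp [PySem.Chars.upper, PySem.Chars.startswith]
  | a :: b :: rest =>
      simp only [PySem.Chars.upper, List.map]
      simp [PySem.Chars.startswith, List.isPrefixOf, upperChar_eq_B, upperChar_eq_digit b '1' (by simp),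
        upperChar_eq_digit b '2' (by simp), upperChar_eq_digit b '3' (by simp)]
      by_cases ha : a = 'B' ∨ a = 'b' <;>
        by_cases hb1 : b = '1' <;> by_cases hb2 : b = '2' <;> by_cases hb3 : b = '3' <;>
        simp_all

-- ===== VERDICT (by name: the statement is the Claim_ definition above) =====
theorem extract_building_py_spec : Claim_equal_extract_building_py := by
  intro room _
  unfold Spec_extract_building_py
  cases room with
  | none => rfl
  | some r =>
      simp only [extract_building_py, extract_building_py_alt]
      split_ifs
      · rfl
      · exact pvScan_eq_alt r
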